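-- pv_equiv track=rewrite | github.com/sgerodes/multidimensional_neigbourhood_test | Blind4Basics.py | genNeigh
-- ===== SOURCE A (Python) =====
-- def genNeigh(isNeum, arr, coords, d, var=0, idx=()):
--     depth = len(idx)
--     x     = coords[depth]
--
--     if not (0 <= x < len(arr)): raise IndexError()
--
--     low, up = -d + isNeum*var, d - isNeum*var+1
--     for j in range(max(0, low+x), min(up+x, len(arr))):
--         indexes = idx+(j,)
--         if 0 <= j < len(arr) and indexes != coords:
--             if depth < len(coords)-1:
--                 yield from genNeigh(isNeum, arr[j], coords, d, var+abs(j-x), indexes)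
--             else:
--                 yield arr[j]
-- ===== SOURCE B (Python) =====
-- def genNeigh(isNeum, arr, coords, d, var=0, idx=()):
--     # Iterative DFS with an explicit stack of (subarray, index-path, variance) frames
--     # instead of A's recursive generator; returns the collected elements as a list.
--     out = []
--     stack = [(arr, tuple(idx), var)]
--     while stack:
--         sub, path, v = stack.pop()
--         depth = len(path)
--         x = coords[depth]
--         if not (0 <= x < len(sub)):
--             raise IndexError()
--         s = v if isNeum else 0
--         js = range(max(0, x - d + s), min(x + d - s + 1, len(sub)))
--         if depth == len(coords) - 1:
--             out.extend(sub[j] for j in js if path + (j,) != coords)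
--         else:
--             for j in reversed(js):
--                 if path + (j,) != coords:
--                     stack.append((sub[j], path + (j,), v + abs(j - x)))
--     return out
-- ===== Notes on version B (the rewrite author's own statement) =====
-- stated objective: alternative
-- what changed: A's recursive generator is replaced by an iterative DFS that drains an explicit stack of (subarray, index-path, variance) frames, pushing children in reverse so leaf elements come out in the same ascending pre-order, and collects results into a list instead of yielding.
import Mathlib
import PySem

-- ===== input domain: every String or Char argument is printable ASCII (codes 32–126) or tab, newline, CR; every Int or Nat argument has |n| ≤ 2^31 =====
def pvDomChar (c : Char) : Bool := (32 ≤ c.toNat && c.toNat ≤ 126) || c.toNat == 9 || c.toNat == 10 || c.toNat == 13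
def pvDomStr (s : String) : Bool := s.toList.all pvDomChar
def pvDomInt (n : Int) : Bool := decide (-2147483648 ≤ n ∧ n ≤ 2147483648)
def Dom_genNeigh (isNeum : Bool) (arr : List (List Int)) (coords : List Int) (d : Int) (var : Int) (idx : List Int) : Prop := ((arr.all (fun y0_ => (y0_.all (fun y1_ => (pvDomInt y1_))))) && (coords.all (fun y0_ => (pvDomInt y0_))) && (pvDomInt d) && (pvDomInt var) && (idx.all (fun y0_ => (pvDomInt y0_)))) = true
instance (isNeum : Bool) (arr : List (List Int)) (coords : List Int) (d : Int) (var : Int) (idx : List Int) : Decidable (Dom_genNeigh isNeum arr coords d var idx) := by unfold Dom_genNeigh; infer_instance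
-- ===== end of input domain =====

-- B replaces A's recursive generator by an iterative DFS over an explicit stack of
-- (subarray, index-path, variance) frames, collecting leaf elements into a list.
-- ===== PORT A =====
-- A's recursion descends one level per call; under the declared 2-D type the recursive
-- call lands in a row (List Int), so it is ported as the helper genNeighRow.
def genNeighRow (isNeum : Bool) (row : List Int) (coords : List Int) (d : Int) (var : Int) (idx : List Int) : List Int :=
  let depth := idx.length
  if depth < coords.length then
    let x := coords.getD depth 0
    if 0 ≤ x ∧ x < (row.length : Int) then
      let s : Int := if isNeum then var else 0
      let low := -d + s
      let up := d - s + 1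
      (PySem.List.pyRange (max 0 (low + x)) (min (up + x) (row.length : Int)) 1).foldl
        (fun acc j =>
          if 0 ≤ j ∧ j < (row.length : Int) ∧ idx ++ [j] ≠ coords then
            if depth < coords.length - 1 then
              acc  -- Python recurses into row[j] (an int) and raises TypeError; outside Pre_
            else acc ++ [PySem.List.pyGetD row j 0]
          else acc) []
    else []  -- Python raises IndexError
  else []  -- coords[depth] raises IndexError

def genNeigh (isNeum : Bool) (arr : List (List Int)) (coords : List Int) (d : Int) (var : Int) (idx : List Int) : List Int :=
  let depth := idx.length
  if depth < coords.length then
    let x := coords.getD depth 0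
    if 0 ≤ x ∧ x < (arr.length : Int) then
      let s : Int := if isNeum then var else 0
      let low := -d + s
      let up := d - s + 1
      (PySem.List.pyRange (max 0 (low + x)) (min (up + x) (arr.length : Int)) 1).foldl
        (fun acc j =>
          if 0 ≤ j ∧ j < (arr.length : Int) ∧ idx ++ [j] ≠ coords then
            if depth < coords.length - 1 then
              acc ++ genNeighRow isNeum (PySem.List.pyGetD arr j []) coords d (var + |j - x|) (idx ++ [j])
            else acc  -- Python yields arr[j], a whole row (a list, not an Int); outside Pre_
          else acc) []
    else []  -- Python raises IndexError
  else []  -- coords[depth] raises IndexError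

-- ===== PORT B =====
-- out.extend(sub[j] for j in js if path+(j,) != coords) of Source B's leaf branch
def altLeaf (isNeum : Bool) (coords : List Int) (d : Int) (sub : List Int) (path : List Int) (v : Int) : List Int :=
  let x := coords.getD path.length 0
  let s : Int := if isNeum then v else 0
  ((PySem.List.pyRange (max 0 (x - d + s)) (min (x + d - s + 1) (sub.length : Int)) 1).filter
      (fun j => path ++ [j] != coords)).map (fun j => PySem.List.pyGetD sub j 0)

-- Source B's while loop over the frame stack (head = top of stack, ascending order)
def altLoop (isNeum : Bool) (coords : List Int) (d : Int) (stack : List (List Int × List Int × Int)) (out : List Int) : List Int :=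
  match stack with
  | [] => out
  | (sub, path, v) :: rest =>
    if path.length < coords.length then
      let x := coords.getD path.length 0
      if 0 ≤ x ∧ x < (sub.length : Int) then
        if path.length = coords.length - 1 then
          altLoop isNeum coords d rest (out ++ altLeaf isNeum coords d sub path v)
        else altLoop isNeum coords d rest out  -- children sub[j] are Ints, not rows; outside Pre_
      else out  -- Python raises IndexError
    else out  -- coords[depth] raises IndexError

def genNeigh_alt (isNeum : Bool) (arr : List (List Int)) (coords : List Int) (d : Int) (var : Int) (idx : List Int) : List Int :=
  if idx.length < coords.length then
    let x := coords.getD idx.length 0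
    if 0 ≤ x ∧ x < (arr.length : Int) then
      let s : Int := if isNeum then var else 0
      let js := PySem.List.pyRange (max 0 (x - d + s)) (min (x + d - s + 1) (arr.length : Int)) 1
      if idx.length = coords.length - 1 then
        []  -- leaf at the root: Python would collect rows (lists, not Ints); inside Pre_ only when the center filter leaves nothing, where Source B also returns []
      else
        altLoop isNeum coords d
          ((js.filter (fun j => idx ++ [j] != coords)).map
            (fun j => (PySem.List.pyGetD arr j [], idx ++ [j], var + |j - x|))) []
    else []  -- Python raises IndexError
  else []  -- coords[depth] raises IndexError

-- ===== PRECONDITION & SPEC =====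
-- Pre_ excludes the inputs where A raises (IndexError on coords/depth or on an entered
-- subarray, TypeError below the typed two levels), and the inputs where A yields whole
-- rows (len(coords) = len(idx)+1 with a non-empty yield), whose values are lists of
-- lists and not values of the declared return type list[int].
def Pre_genNeigh (isNeum : Bool) (arr : List (List Int)) (coords : List Int) (d : Int) (var : Int) (idx : List Int) : Prop :=
  let x := coords.getD idx.length 0
  let s : Int := if isNeum then var else 0
  let lo := max 0 (x - d + s)
  let hi := min (x + d - s + 1) (arr.length : Int)
  idx.length < coords.length ∧ 0 ≤ x ∧ x < (arr.length : Int) ∧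
  (hi ≤ lo ∨
   (coords.length = idx.length + 1 ∧ idx ++ [x] = coords ∧ lo = x ∧ hi = x + 1) ∨
   (coords.length = idx.length + 2 ∧ 0 ≤ coords.getD (idx.length + 1) 0 ∧
    ∀ j ∈ PySem.List.pyRange lo hi 1,
      coords.getD (idx.length + 1) 0 < ((PySem.List.pyGetD arr j []).length : Int)))
instance (isNeum : Bool) (arr : List (List Int)) (coords : List Int) (d : Int) (var : Int) (idx : List Int) : Decidable (Pre_genNeigh isNeum arr coords d var idx) := by unfold Pre_genNeigh; infer_instance
def pvWitness_genNeigh : Bool × List (List Int) × List Int × Int × Int × List Int := (false, [[1, 2], [3, 4]], [0, 0], 1, 0, [])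
def Spec_genNeigh (isNeum : Bool) (arr : List (List Int)) (coords : List Int) (d : Int) (var : Int) (idx : List Int) (out : List Int) : Prop := out = genNeigh_alt isNeum arr coords d var idx
instance (isNeum : Bool) (arr : List (List Int)) (coords : List Int) (d : Int) (var : Int) (idx : List Int) (out : List Int) : Decidable (Spec_genNeigh isNeum arr coords d var idx out) := by unfold Spec_genNeigh; infer_instance

-- ===== CLAIM (what is proved, stated in full; the proofs are below) =====
def Claim_equal_genNeigh : Prop := ∀ (isNeum : Bool) (arr : List (List Int)) (coords : List Int) (d : Int) (var : Int) (idx : List Int), Dom_genNeigh isNeum arr coords d var idx → Pre_genNeigh isNeum arr coords d var idx → Spec_genNeigh isNeum arr coords d var idx (genNeigh isNeum arr coords d var idx)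

-- ===== LEMMAS AND PROOFS =====

-- A's leaf-level loop collects exactly the non-center in-bounds elements, in order.
theorem foldl_leaf_char (row coords path : List Int) (R : List Int)
    (hnd : ¬ path.length < coords.length - 1)
    (hR : ∀ j ∈ R, 0 ≤ j ∧ j < (row.length : Int)) (acc : List Int) :
    R.foldl (fun acc j =>
        if 0 ≤ j ∧ j < (row.length : Int) ∧ path ++ [j] ≠ coords then
          if path.length < coords.length - 1 then acc
          else acc ++ [PySem.List.pyGetD row j 0]
        else acc) acc =
      acc ++ (R.filter (fun j => path ++ [j] != coords)).map (fun j => PySem.List.pyGetD row j 0) := by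
  induction R generalizing acc with
  | nil => simp
  | cons j rest ih =>
    obtain ⟨hj0, hj1⟩ := hR j (List.mem_cons_self ..)
    have ih' := ih (fun g hg => hR g (List.mem_cons_of_mem _ hg))
    by_cases hc : path ++ [j] = coords
    · rw [List.foldl_cons, if_neg (by simp [hc]), ih']
      simp [hc]
    · rw [List.foldl_cons, if_pos ⟨hj0, hj1, hc⟩, if_neg hnd, ih']
      simp [hc]

-- A's root loop, two levels above the leaves, is a concatenation of the recursive calls.
theorem foldl_outer_char (isNeum : Bool) (arr : List (List Int)) (coords : List Int)
    (d var x : Int) (idx : List Int) (R : List Int)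
    (h2 : coords.length = idx.length + 2)
    (hR : ∀ j ∈ R, 0 ≤ j ∧ j < (arr.length : Int)) (acc : List Int) :
    R.foldl (fun acc j =>
        if 0 ≤ j ∧ j < (arr.length : Int) ∧ idx ++ [j] ≠ coords then
          if idx.length < coords.length - 1 then
            acc ++ genNeighRow isNeum (PySem.List.pyGetD arr j []) coords d (var + |j - x|) (idx ++ [j])
          else acc
        else acc) acc =
      acc ++ R.flatMap (fun j =>
        genNeighRow isNeum (PySem.List.pyGetD arr j []) coords d (var + |j - x|) (idx ++ [j])) := by
  induction R generalizing acc with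
  | nil => simp
  | cons j rest ih =>
    obtain ⟨hj0, hj1⟩ := hR j (List.mem_cons_self ..)
    have hne : idx ++ [j] ≠ coords := by
      intro hcontra
      have := congrArg List.length hcontra
      simp at this; omega
    have hlt : idx.length < coords.length - 1 := by omega
    have ih' := ih (fun g hg => hR g (List.mem_cons_of_mem _ hg))
    rw [List.foldl_cons, if_pos ⟨hj0, hj1, hne⟩, if_pos hlt, ih']
    simp

-- Draining a stack whose frames are all in-bounds leaf frames appends their leaf outputs in order.
theorem altLoop_flat (isNeum : Bool) (coords : List Int) (d : Int)
    (frames : List (List Int × List Int × Int)) (out : List Int)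
    (h : ∀ f ∈ frames, f.2.1.length < coords.length ∧
        0 ≤ coords.getD f.2.1.length 0 ∧ coords.getD f.2.1.length 0 < (f.1.length : Int) ∧
        f.2.1.length = coords.length - 1) :
    altLoop isNeum coords d frames out =
      out ++ frames.flatMap (fun f => altLeaf isNeum coords d f.1 f.2.1 f.2.2) := by
  induction frames generalizing out with
  | nil => simp [altLoop]
  | cons f rest ih =>
    obtain ⟨h1, h2, h3, h4⟩ := h f (List.mem_cons_self ..)
    obtain ⟨sub, path, v⟩ := f
    simp only [altLoop]
    rw [if_pos h1, if_pos ⟨h2, h3⟩, if_pos h4,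
      ih _ (fun g hg => h g (List.mem_cons_of_mem _ hg))]
    simp

-- A's recursive call at the leaf level equals B's leaf comprehension.
theorem row_eq_leaf (isNeum : Bool) (row : List Int) (coords : List Int) (d : Int) (v : Int)
    (path : List Int) (hlen : coords.length = path.length + 1)
    (hx0 : 0 ≤ coords.getD path.length 0)
    (hx1 : coords.getD path.length 0 < (row.length : Int)) :
    genNeighRow isNeum row coords d v path = altLeaf isNeum coords d row path v := by
  have hd : path.length < coords.length := by omega
  simp only [genNeighRow, altLeaf, if_pos hd, if_pos (⟨hx0, hx1⟩ : _ ∧ _)]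
  have e1 : -d + (if isNeum then v else 0) + coords.getD path.length 0 =
      coords.getD path.length 0 - d + (if isNeum then v else 0) := by ring
  have e2 : d - (if isNeum then v else 0) + 1 + coords.getD path.length 0 =
      coords.getD path.length 0 + d - (if isNeum then v else 0) + 1 := by ring
  rw [e1, e2, foldl_leaf_char row coords path _ (by omega)
    (by
      intro j hj
      rw [PySem.List.mem_pyRange_one] at hj
      exact ⟨le_trans (le_max_left 0 _) hj.1, lt_of_lt_of_le hj.2 (min_le_right _ _)⟩)]
  simp

theorem genNeigh_spec_aux (isNeum : Bool) (arr : List (List Int)) (coords : List Int)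
    (d : Int) (var : Int) (idx : List Int) (hpre : Pre_genNeigh isNeum arr coords d var idx) :
    genNeigh isNeum arr coords d var idx = genNeigh_alt isNeum arr coords d var idx := by
  obtain ⟨hdl, hx0, hx1, hcase⟩ := hpre
  simp only [genNeigh, genNeigh_alt, if_pos hdl, if_pos (⟨hx0, hx1⟩ : _ ∧ _)]
  have e1 : -d + (if isNeum then var else 0) + coords.getD idx.length 0 =
      coords.getD idx.length 0 - d + (if isNeum then var else 0) := by ring
  have e2 : d - (if isNeum then var else 0) + 1 + coords.getD idx.length 0 =
      coords.getD idx.length 0 + d - (if isNeum then var else 0) + 1 := by ring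
  rw [e1, e2]
  rcases hcase with hempty | ⟨hc1, hc2, hc3, hc4⟩ | ⟨hc1, hc2, hc3⟩
  · -- the index window is empty: both sides compute []
    rw [PySem.List.pyRange_one_eq_nil hempty]
    simp [altLoop]
  · -- leaf at the root with the window reduced to the excluded center: both sides compute []
    rw [hc3, hc4, PySem.List.pyRange_one_singleton,
      if_pos (by omega : idx.length = coords.length - 1),
      List.foldl_cons, if_neg (fun h => h.2.2 hc2)]
    simp
  · -- two levels: A's fold of recursive calls = B's drained stack of leaf frames
    rw [if_neg (by omega : ¬ idx.length = coords.length - 1)]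
    have hbounds : ∀ j ∈ PySem.List.pyRange
        (max 0 (coords.getD idx.length 0 - d + (if isNeum then var else 0)))
        (min (coords.getD idx.length 0 + d - (if isNeum then var else 0) + 1) (arr.length : Int)) 1,
        0 ≤ j ∧ j < (arr.length : Int) := by
      intro j hj
      rw [PySem.List.mem_pyRange_one] at hj
      exact ⟨le_trans (le_max_left 0 _) hj.1, lt_of_lt_of_le hj.2 (min_le_right _ _)⟩
    rw [foldl_outer_char isNeum arr coords d var _ idx _ hc1 hbounds]
    have hfilter : (PySem.List.pyRange
        (max 0 (coords.getD idx.length 0 - d + (if isNeum then var else 0)))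
        (min (coords.getD idx.length 0 + d - (if isNeum then var else 0) + 1) (arr.length : Int)) 1).filter
          (fun j => idx ++ [j] != coords) =
        PySem.List.pyRange
        (max 0 (coords.getD idx.length 0 - d + (if isNeum then var else 0)))
        (min (coords.getD idx.length 0 + d - (if isNeum then var else 0) + 1) (arr.length : Int)) 1 := by
      apply List.filter_eq_self.mpr
      intro j _
      simp only [bne_iff_ne, ne_eq]
      intro hcontra
      have := congrArg List.length hcontra
      simp at this; omega
    rw [hfilter]
    rw [altLoop_flat _ _ _ _ _ (by
      intro f hf
      obtain ⟨j, hj, rfl⟩ := List.mem_map.mp hf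
      refine ⟨by simp; omega, by simpa using hc2, by simpa using hc3 j hj, by simp; omega⟩)]
    rw [List.flatMap_map]
    simp only [List.nil_append]
    apply List.flatMap_congr
    intro j hj
    exact row_eq_leaf isNeum (PySem.List.pyGetD arr j []) coords d
      (var + |j - coords.getD idx.length 0|) (idx ++ [j]) (by simp; omega)
      (by simpa using hc2) (by simpa using hc3 j hj)

-- ===== VERDICT (by name: the statement is the Claim_ definition above) =====
theorem genNeigh_spec : Claim_equal_genNeigh := by
  intro isNeum arr coords d var idx _ hpre
  exact genNeigh_spec_aux isNeum arr coords d var idx hpre
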